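-- pv_equiv track=rewrite | github.com/Arsen1302/Code-copy-detector | TestData/solutions/problem_1519_4.py | solution_1519_4
-- ===== SOURCE A (Python) =====
-- def solution_1519_4(text: str, pattern: str) -> int:
--     ans = cnt0 = cnt1 = 0
--     for ch in text:
--         if ch == pattern[1]:
--             ans += cnt0
--             cnt1 += 1
--         if ch == pattern[0]: cnt0 += 1
--     return ans + max(cnt0, cnt1)
-- ===== SOURCE B (Python) =====
-- def solution_1519_4(text: str, pattern: str) -> int:
--     # Divide and conquer: split the text in half, count pairs recursively, combine
--     # with cross pairs = (#pattern[0] in left half) * (#pattern[1] in right half).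
--     if not text:
--         return 0
--     p0, p1 = pattern[0], pattern[1]
--
--     def solve(s):
--         # returns (pairs of pattern[0]..pattern[1] in s, count of p0 in s, count of p1 in s)
--         if not s:
--             return (0, 0, 0)
--         if len(s) == 1:
--             return (0, 1 if s == p0 else 0, 1 if s == p1 else 0)
--         mid = len(s) // 2
--         pl, a0, a1 = solve(s[:mid])
--         pr, b0, b1 = solve(s[mid:])
--         return (pl + pr + a0 * b1, a0 + b0, a1 + b1)
--
--     pairs, c0, c1 = solve(text)
--     return pairs + max(c0, c1)
-- ===== Notes on version B (the rewrite author's own statement) =====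
-- stated objective: alternative
-- what changed: B replaces A's single left-to-right counting pass by a divide-and-conquer recursion: split the text in half, recursively get (pairs, count of pattern[0], count of pattern[1]) for each half, and combine with cross pairs = left count of pattern[0] times right count of pattern[1].
import Mathlib
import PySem

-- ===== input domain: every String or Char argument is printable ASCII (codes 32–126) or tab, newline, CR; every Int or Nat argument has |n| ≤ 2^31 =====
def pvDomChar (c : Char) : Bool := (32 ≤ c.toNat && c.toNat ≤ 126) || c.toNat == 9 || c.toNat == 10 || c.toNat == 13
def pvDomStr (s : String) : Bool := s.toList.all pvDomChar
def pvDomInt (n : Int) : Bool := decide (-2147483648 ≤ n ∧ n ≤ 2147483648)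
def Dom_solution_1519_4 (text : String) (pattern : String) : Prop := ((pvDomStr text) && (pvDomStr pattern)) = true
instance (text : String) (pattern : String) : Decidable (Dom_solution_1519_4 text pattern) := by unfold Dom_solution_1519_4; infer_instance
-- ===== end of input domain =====

-- B counts the pattern[0]..pattern[1] subsequence pairs by divide and conquer (split in half,
-- combine with cross products) instead of A's single left-to-right pass; same values everywhere A returns.

-- ===== PORT A =====
-- loop body of A: if ch == pattern[1]: ans += cnt0; cnt1 += 1;  if ch == pattern[0]: cnt0 += 1
def stepA (q0 q1 : Option Char) (s : Int × Int × Int) (ch : Char) : Int × Int × Int :=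
  let (ans, c0, c1) := s
  let (ans, c1) := if some ch = q1 then (ans + c0, c1 + 1) else (ans, c1)
  let c0 := if some ch = q0 then c0 + 1 else c0
  (ans, c0, c1)

def solution_1519_4 (text : String) (pattern : String) : Int :=
  let r := text.toList.foldl (stepA (PySem.Str.pyGet? pattern 0) (PySem.Str.pyGet? pattern 1)) (0, 0, 0)
  r.1 + max r.2.1 r.2.2

-- ===== PORT B =====
-- B's inner 'solve': (pairs, count of p0, count of p1), splitting s at len(s)//2
def solveB (p0 p1 : Char) (s : List Char) : Int × Int × Int :=
  if s.length = 0 then (0, 0, 0)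
  else if _h1 : s.length = 1 then
    (0, if s = [p0] then 1 else 0, if s = [p1] then 1 else 0)
  else
    let mid := s.length / 2
    let (pl, a0, a1) := solveB p0 p1 (s.take mid)
    let (pr, b0, b1) := solveB p0 p1 (s.drop mid)
    (pl + pr + a0 * b1, a0 + b0, a1 + b1)
termination_by s.length
decreasing_by
  · simp [List.length_take]; omega
  · simp [List.length_drop]; omega

def solution_1519_4_alt (text : String) (pattern : String) : Int :=
  if text.toList = [] then 0
  else
    match PySem.Str.pyGet? pattern 0, PySem.Str.pyGet? pattern 1 with
    | some p0, some p1 =>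
      let (pairs, c0, c1) := solveB p0 p1 text.toList
      pairs + max c0 c1
    | _, _ => 0  -- Python B raises IndexError here (nonempty text, pattern shorter than 2: outside Pre_)

-- ===== PRECONDITION & SPEC =====
-- Pre_ excludes exactly the inputs where Python A raises IndexError (nonempty text with a pattern shorter than 2; B raises there too).
def Pre_solution_1519_4 (text : String) (pattern : String) : Prop :=
  text.toList = [] ∨ 2 ≤ pattern.toList.length
instance (text : String) (pattern : String) : Decidable (Pre_solution_1519_4 text pattern) := by unfold Pre_solution_1519_4; infer_instance
def pvWitness_solution_1519_4 : String × String := ("abcab", "ab")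

def Spec_solution_1519_4 (text : String) (pattern : String) (out : Int) : Prop := out = solution_1519_4_alt text pattern
instance (text : String) (pattern : String) (out : Int) : Decidable (Spec_solution_1519_4 text pattern out) := by unfold Spec_solution_1519_4; infer_instance

-- ===== CLAIM (what is proved, stated in full; the proofs are below) =====
def Claim_equal_solution_1519_4 : Prop := ∀ (text : String) (pattern : String), Dom_solution_1519_4 text pattern → Pre_solution_1519_4 text pattern → Spec_solution_1519_4 text pattern (solution_1519_4 text pattern)

-- ===== LEMMAS AND PROOFS =====

-- Int-valued character count
def cntI (p : Char) : List Char → Int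
  | [] => 0
  | x :: t => (if x = p then 1 else 0) + cntI p t

-- pairs function: fAux p0 p1 l k = A's 'ans' contribution of l when cnt0 starts at k
def fAux (p0 p1 : Char) : List Char → Int → Int
  | [], _ => 0
  | x :: t, k => (if x = p1 then k else 0) + fAux p0 p1 t (k + if x = p0 then 1 else 0)

lemma cntI_append (p : Char) (u v : List Char) : cntI p (u ++ v) = cntI p u + cntI p v := by
  induction u with
  | nil => simp [cntI]
  | cons x t ih => simp [cntI, ih]; ring

lemma fAux_shift (p0 p1 : Char) (v : List Char) (k : Int) :
    fAux p0 p1 v k = fAux p0 p1 v 0 + k * cntI p1 v := by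
  induction v generalizing k with
  | nil => simp [fAux, cntI]
  | cons x t ih =>
    simp only [fAux, cntI]
    rw [ih, ih (0 + if x = p0 then 1 else 0)]
    split_ifs <;> ring

lemma fAux_append (p0 p1 : Char) (u v : List Char) (k : Int) :
    fAux p0 p1 (u ++ v) k = fAux p0 p1 u k + fAux p0 p1 v (k + cntI p0 u) := by
  induction u generalizing k with
  | nil => simp [fAux, cntI]
  | cons x t ih =>
    simp only [List.cons_append, fAux, cntI]
    rw [ih]
    ring_nf

-- A's fold from an arbitrary state, characterized by fAux and cntI
lemma foldA_char (p0 p1 : Char) (l : List Char) (a b c : Int) :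
    l.foldl (stepA (some p0) (some p1)) (a, b, c) =
      (a + fAux p0 p1 l b, b + cntI p0 l, c + cntI p1 l) := by
  induction l generalizing a b c with
  | nil => simp [fAux, cntI]
  | cons x t ih =>
    simp only [List.foldl_cons, stepA, fAux, cntI, Option.some.injEq]
    rw [ih]
    split_ifs <;> refine Prod.ext ?_ (Prod.ext ?_ ?_) <;> simp <;> ring

-- B's divide-and-conquer computes (fAux .. 0, cntI p0, cntI p1)
lemma solveB_char (p0 p1 : Char) : ∀ (n : Nat) (s : List Char), s.length ≤ n →
    solveB p0 p1 s = (fAux p0 p1 s 0, cntI p0 s, cntI p1 s) := by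
  intro n
  induction n with
  | zero =>
    intro s hs
    have : s = [] := List.eq_nil_of_length_eq_zero (Nat.le_zero.mp hs)
    subst this; simp [solveB, fAux, cntI]
  | succ m ih =>
    intro s hs
    match s with
    | [] => simp [solveB, fAux, cntI]
    | [x] =>
      simp [solveB, fAux, cntI]
    | x :: y :: t =>
      rw [solveB]
      have hlen : (x :: y :: t).length = t.length + 2 := by simp
      have h0 : ¬ (x :: y :: t).length = 0 := by omega
      have h1 : ¬ (x :: y :: t).length = 1 := by omega
      simp only [h0, h1, if_false, dif_neg, not_false_iff]
      set mid := (x :: y :: t).length / 2 with hmid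
      have hmid1 : 1 ≤ mid := by omega
      have hmidlt : mid < (x :: y :: t).length := by omega
      rw [ih _ (by simp [List.length_take]; omega), ih _ (by simp [List.length_drop]; omega)]
      have hsplit : (x :: y :: t) = (x :: y :: t).take mid ++ (x :: y :: t).drop mid :=
        (List.take_append_drop mid _).symm
      simp only
      rw [show fAux p0 p1 (x :: y :: t) 0 = fAux p0 p1 ((x :: y :: t).take mid ++ (x :: y :: t).drop mid) 0 from by rw [← hsplit],
          show cntI p0 (x :: y :: t) = cntI p0 ((x :: y :: t).take mid ++ (x :: y :: t).drop mid) from by rw [← hsplit],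
          show cntI p1 (x :: y :: t) = cntI p1 ((x :: y :: t).take mid ++ (x :: y :: t).drop mid) from by rw [← hsplit]]
      rw [fAux_append, cntI_append, cntI_append,
          fAux_shift p0 p1 ((x :: y :: t).drop mid) (0 + cntI p0 ((x :: y :: t).take mid))]
      refine Prod.ext (by push_cast; ring) (Prod.ext rfl rfl)

-- ===== VERDICT (by name: the statement is the Claim_ definition above) =====
theorem solution_1519_4_spec : Claim_equal_solution_1519_4 := by
  intro text pattern _ hpre
  unfold Spec_solution_1519_4 solution_1519_4 solution_1519_4_alt
  by_cases ht : text.toList = []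
  · simp [ht]
  · rcases hpre with h | h
    · exact absurd h ht
    · obtain ⟨p0, hp0⟩ : ∃ c, PySem.Str.pyGet? pattern 0 = some c := by
        have := PySem.Str.pyGet?_natCast (s := pattern) (n := 0)
        refine ⟨pattern.toList[0]'(by omega), ?_⟩
        simp_all
      obtain ⟨p1, hp1⟩ : ∃ c, PySem.Str.pyGet? pattern 1 = some c := by
        have := PySem.Str.pyGet?_natCast (s := pattern) (n := 1)
        refine ⟨pattern.toList[1]'(by omega), ?_⟩
        simp_all
      simp only [ht, if_false, hp0, hp1]
      rw [foldA_char, solveB_char p0 p1 text.toList.length _ le_rfl]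
      simp
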